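-- pv_equiv track=rewrite | github.com/nengnengjiang/appliedml_coding | plaid_coding_interview/recurring_txn.py | _has_recurring_strict
-- ===== SOURCE A (Python) =====
-- def _has_recurring_strict(day_amt_list):
--     n = len(day_amt_list)
--     if n < 3:
--         return False
--     for i in range(n - 2):
--         d1, a1 = day_amt_list[i]
--         d2, a2 = day_amt_list[i + 1]
--         d3, a3 = day_amt_list[i + 2]
--         # strict amount match
--         if a1 != a2 or a2 != a3:
--             continue
--         gap1 = d2 - d1
--         gap2 = d3 - d2
--         # strict gap match
--         if gap1 == gap2 and gap1 > 0:
--             return True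
--     return False
-- ===== SOURCE B (Python) =====
-- def _has_recurring_strict(day_amt_list):
--     # Group the list into maximal runs of equal amount, then look for an
--     # arithmetic triple of days (equal positive gap) inside each run.
--     # A qualifying triple needs three equal amounts, so it can never cross
--     # a run boundary.
--     n = len(day_amt_list)
--     i = 0
--     while i < n:
--         j = i + 1
--         while j < n and day_amt_list[j][1] == day_amt_list[i][1]:
--             j += 1
--         run_days = [d for d, _ in day_amt_list[i:j]]
--         if _run_has_ap_triple(run_days):
--             return True
--         i = j
--     return False
--
--
-- def _run_has_ap_triple(days):
--     for k in range(len(days) - 2):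
--         g = days[k + 1] - days[k]
--         if g > 0 and days[k + 2] - days[k + 1] == g:
--             return True
--     return False
-- ===== Notes on version B (the rewrite author's own statement) =====
-- stated objective: alternative
-- what changed: Replaces A's single triple-window scan over the whole list with a run-length decomposition: the list is segmented into maximal runs of equal amount, and each run's day sequence is searched for an arithmetic triple with positive common gap (valid because a qualifying triple has three equal amounts and so never crosses a run boundary).
import Mathlib
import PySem

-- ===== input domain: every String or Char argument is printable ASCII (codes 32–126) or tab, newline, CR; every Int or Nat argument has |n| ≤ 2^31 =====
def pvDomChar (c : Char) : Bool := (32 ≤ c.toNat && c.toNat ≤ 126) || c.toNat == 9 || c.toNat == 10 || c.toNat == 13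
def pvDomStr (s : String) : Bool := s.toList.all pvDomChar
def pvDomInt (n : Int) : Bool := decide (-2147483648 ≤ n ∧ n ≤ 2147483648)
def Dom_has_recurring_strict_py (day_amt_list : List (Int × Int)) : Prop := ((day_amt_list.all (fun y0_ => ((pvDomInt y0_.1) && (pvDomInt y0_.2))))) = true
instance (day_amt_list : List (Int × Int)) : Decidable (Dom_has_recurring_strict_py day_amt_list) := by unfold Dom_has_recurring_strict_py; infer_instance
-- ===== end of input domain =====

-- B replaces A's triple-window scan with a run-length decomposition by amount plus a per-run day-gap check (alternative structure, same cost).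

-- ===== PORT A =====
-- body of A's loop for index i (returns True ⇔ the loop would 'return True' at i)
def pvTripleAt (day_amt_list : List (Int × Int)) (i : Int) : Bool :=
  match PySem.List.pyGet? day_amt_list i, PySem.List.pyGet? day_amt_list (i + 1),
        PySem.List.pyGet? day_amt_list (i + 2) with
  | some (d1, a1), some (d2, a2), some (d3, a3) =>
      if a1 ≠ a2 ∨ a2 ≠ a3 then false
      else
        let gap1 := d2 - d1
        let gap2 := d3 - d2
        gap1 == gap2 && decide (gap1 > 0)
  | _, _, _ => false

def has_recurring_strict_py (day_amt_list : List (Int × Int)) : Bool :=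
  let n : Int := day_amt_list.length
  if n < 3 then false
  else (PySem.List.pyRange 0 (n - 2) 1).any (fun i => pvTripleAt day_amt_list i)

-- ===== PORT B =====
-- inner while loop + slice: split off the days of the maximal run whose amount equals a,
-- returning (days of the run, remaining suffix)
def pvSplitRun (a : Int) : List (Int × Int) → List Int × List (Int × Int)
  | [] => ([], [])
  | (d, a') :: rest =>
      if a' == a then
        let p := pvSplitRun a rest
        (d :: p.1, p.2)
      else ([], (d, a') :: rest)

-- _run_has_ap_triple: scan a run's days for an arithmetic triple with positive gap
def pvRunAP : List Int → Bool
  | d1 :: d2 :: d3 :: rest =>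
      (decide (d2 - d1 > 0) && (d3 - d2 == d2 - d1)) || pvRunAP (d2 :: d3 :: rest)
  | _ => false

theorem pvSplitRun_rest_le (a : Int) : ∀ xs : List (Int × Int), (pvSplitRun a xs).2.length ≤ xs.length
  | [] => Nat.le_refl _
  | (d, a') :: rest => by
      simp only [pvSplitRun]
      split
      · exact Nat.le_succ_of_le (pvSplitRun_rest_le a rest)
      · exact Nat.le_refl _

-- outer while loop of B
def pvRunLoop : List (Int × Int) → Bool
  | [] => false
  | (d, a) :: rest =>
      let p := pvSplitRun a rest
      pvRunAP (d :: p.1) || pvRunLoop p.2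
termination_by xs => xs.length
decreasing_by exact Nat.lt_succ_of_le (pvSplitRun_rest_le a rest)

def has_recurring_strict_py_alt (day_amt_list : List (Int × Int)) : Bool :=
  pvRunLoop day_amt_list

-- ===== PRECONDITION & SPEC =====
def Spec_has_recurring_strict_py (day_amt_list : List (Int × Int)) (out : Bool) : Prop := out = has_recurring_strict_py_alt day_amt_list
instance (day_amt_list : List (Int × Int)) (out : Bool) : Decidable (Spec_has_recurring_strict_py day_amt_list out) := by unfold Spec_has_recurring_strict_py; infer_instance

-- ===== CLAIM (what is proved, stated in full; the proofs are below) =====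
def Claim_equal_has_recurring_strict_py : Prop := ∀ (day_amt_list : List (Int × Int)), Dom_has_recurring_strict_py day_amt_list → Spec_has_recurring_strict_py day_amt_list (has_recurring_strict_py day_amt_list)

-- ===== LEMMAS AND PROOFS =====

-- A's negated 'continue' guard as a conjunction
theorem pvCondEq (a1 a2 a3 : Int) (X : Bool) :
    (if a1 ≠ a2 ∨ a2 ≠ a3 then false else X) = ((a1 == a2) && ((a2 == a3) && X)) := by
  by_cases h1 : a1 = a2
  · by_cases h2 : a2 = a3
    · subst h1; subst h2; simp
    · simp [h2, beq_false_of_ne h2]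
  · simp [h1, beq_false_of_ne h1]

-- structural reference version: A's triple condition, by recursion on the list
def pvTri : List (Int × Int) → Bool
  | (d1, a1) :: (d2, a2) :: (d3, a3) :: rest =>
      ((a1 == a2) && ((a2 == a3) && ((d2 - d1 == d3 - d2) && decide (d2 - d1 > 0))))
        || pvTri ((d2, a2) :: (d3, a3) :: rest)
  | _ => false

-- the natural-index form of A's loop body
theorem pvTripleAt_natCast (xs : List (Int × Int)) (k : Nat) :
    pvTripleAt xs (k : Int) =
      match xs[k]?, xs[k+1]?, xs[k+2]? with
      | some (d1, a1), some (d2, a2), some (d3, a3) =>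
          if a1 ≠ a2 ∨ a2 ≠ a3 then false
          else (d2 - d1 == d3 - d2) && decide (d2 - d1 > 0)
      | _, _, _ => false := by
  have h1 : (k : Int) + 1 = ((k + 1 : Nat) : Int) := by push_cast; ring
  have h2 : (k : Int) + 2 = ((k + 2 : Nat) : Int) := by push_cast; ring
  simp only [pvTripleAt, h1, h2, PySem.List.pyGet?_natCast]

-- A's index loop, restated over List.range, equals the structural version
theorem pvRangeAny_eq_pvTri : ∀ xs : List (Int × Int),
    (List.range (xs.length - 2)).any (fun k => pvTripleAt xs (k : Int)) = pvTri xs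
  | [] => rfl
  | [_] => rfl
  | [_, _] => rfl
  | (d1, a1) :: (d2, a2) :: (d3, a3) :: rest => by
      have ih := pvRangeAny_eq_pvTri ((d2, a2) :: (d3, a3) :: rest)
      have hlen : ((d1, a1) :: (d2, a2) :: (d3, a3) :: rest).length - 2
          = (((d2, a2) :: (d3, a3) :: rest).length - 2) + 1 := by
        simp [List.length]
      rw [hlen, List.range_succ_eq_map, List.any_cons, List.any_map]
      have hshift : ∀ k : Nat,
          pvTripleAt ((d1, a1) :: (d2, a2) :: (d3, a3) :: rest) ((k + 1 : Nat) : Int)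
            = pvTripleAt ((d2, a2) :: (d3, a3) :: rest) (k : Int) := by
        intro k
        rw [pvTripleAt_natCast, pvTripleAt_natCast]
        simp
      have hbody : (List.range (((d2, a2) :: (d3, a3) :: rest).length - 2)).any
            (fun k => pvTripleAt ((d1, a1) :: (d2, a2) :: (d3, a3) :: rest) (((k + 1 : Nat)) : Int))
          = pvTri ((d2, a2) :: (d3, a3) :: rest) := by
        rw [← ih]
        simp only [hshift]
      rw [Function.comp_def]
      simp only [hbody]
      rw [pvTri]
      congr 1
      rw [pvTripleAt_natCast]
      show (if a1 ≠ a2 ∨ a2 ≠ a3 then false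
            else (d2 - d1 == d3 - d2) && decide (d2 - d1 > 0)) = _
      rw [pvCondEq]

theorem pvBeqSymm (x y : Int) : (x == y) = (y == x) := by
  by_cases h : x = y
  · subst h; rfl
  · rw [beq_false_of_ne h, beq_false_of_ne (Ne.symm h)]

-- key B-side lemma: peeling one run off the front
theorem pvTri_run (a : Int) : ∀ (rest : List (Int × Int)) (d : Int),
    pvTri ((d, a) :: rest)
      = (pvRunAP (d :: (pvSplitRun a rest).1) || pvTri (pvSplitRun a rest).2)
  | [], d => rfl
  | (d2, a2) :: rest2, d => by
      by_cases h2 : a2 = a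
      · subst h2
        have ih := pvTri_run a2 rest2 d2
        simp only [pvSplitRun, BEq.rfl, if_true]
        cases rest2 with
        | nil => rfl
        | cons x rest3 =>
          obtain ⟨d3, a3⟩ := x
          by_cases h3 : a3 = a2
          · subst h3
            simp only [pvSplitRun, BEq.rfl, if_true] at ih ⊢
            rw [pvTri, ih, pvRunAP, pvBeqSymm (d2 - d) (d3 - d2)]
            simp [Bool.or_assoc, Bool.and_comm]
          · have hb : (a3 == a2) = false := beq_false_of_ne h3
            simp only [pvSplitRun, hb, Bool.false_eq_true, if_false] at ih ⊢
            rw [pvTri, ih]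
            simp [pvRunAP, beq_false_of_ne (fun h => h3 h.symm)]
      · have hb : (a2 == a) = false := beq_false_of_ne h2
        simp only [pvSplitRun, hb, Bool.false_eq_true, if_false]
        cases rest2 with
        | nil => rfl
        | cons x rest3 =>
          obtain ⟨d3, a3⟩ := x
          rw [pvTri]
          simp [pvRunAP, beq_false_of_ne (fun h => h2 h.symm)]

theorem pvTri_eq_runLoop : ∀ xs : List (Int × Int), pvTri xs = pvRunLoop xs
  | [] => by rw [pvRunLoop]; rfl
  | (d, a) :: rest => by
      rw [pvRunLoop, pvTri_run a rest d,
          pvTri_eq_runLoop (pvSplitRun a rest).2]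
termination_by xs => xs.length
decreasing_by exact Nat.lt_succ_of_le (pvSplitRun_rest_le a rest)

theorem pv_main (xs : List (Int × Int)) :
    has_recurring_strict_py xs = has_recurring_strict_py_alt xs := by
  unfold has_recurring_strict_py has_recurring_strict_py_alt
  by_cases h : xs.length < 3
  · have hInt : (xs.length : Int) < 3 := by exact_mod_cast h
    simp only [hInt, if_true]
    rw [← pvTri_eq_runLoop]
    match xs, h with
    | [], _ => rfl
    | [_], _ => rfl
    | [(_, _), (_, _)], _ => rfl
  · have hInt : ¬ ((xs.length : Int) < 3) := by exact_mod_cast h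
    simp only [hInt, if_false]
    rw [← pvTri_eq_runLoop, ← pvRangeAny_eq_pvTri]
    rw [PySem.List.pyRange_one]
    have ht : (((xs.length : Int) - 2) - 0).toNat = xs.length - 2 := by omega
    rw [ht, List.any_map]
    simp only [Function.comp_def, zero_add]

-- ===== VERDICT (by name: the statement is the Claim_ definition above) =====
theorem has_recurring_strict_py_spec : Claim_equal_has_recurring_strict_py := by
  intro xs _
  exact pv_main xs
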